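-- pv_equiv track=rewrite | github.com/buminduyasith/ikman_house_crawler | main.py | _parse_price_lkr
-- ===== SOURCE A (Python) =====
-- from typing import Optional
--
-- def _parse_price_lkr(price_text: str) -> Optional[int]:
--     digits = "".join(ch for ch in (price_text or "") if ch.isdigit())
--     if not digits:
--         return None
--     try:
--         return int(digits)
--     except ValueError:
--         return None
-- ===== SOURCE B (Python) =====
-- from typing import Optional
--
--
-- def _parse_price_lkr(price_text: str) -> Optional[int]:
--     # Fold the digits directly into an integer (Horner's method): no
--     # intermediate string is built and int() is never called.
--     value = 0
--     found = False
--     for ch in (price_text or ""):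
--         if ch.isdigit():
--             value = value * 10 + (ord(ch) - 48)
--             found = True
--     return value if found else None
-- ===== Notes on version B (the rewrite author's own statement) =====
-- stated objective: alternative
-- what changed: Instead of building a filtered digit string and parsing it with int(), B folds the digits directly into a running integer accumulator (Horner's method) in one pass, tracking with a flag whether any digit was seen.
import Mathlib
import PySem

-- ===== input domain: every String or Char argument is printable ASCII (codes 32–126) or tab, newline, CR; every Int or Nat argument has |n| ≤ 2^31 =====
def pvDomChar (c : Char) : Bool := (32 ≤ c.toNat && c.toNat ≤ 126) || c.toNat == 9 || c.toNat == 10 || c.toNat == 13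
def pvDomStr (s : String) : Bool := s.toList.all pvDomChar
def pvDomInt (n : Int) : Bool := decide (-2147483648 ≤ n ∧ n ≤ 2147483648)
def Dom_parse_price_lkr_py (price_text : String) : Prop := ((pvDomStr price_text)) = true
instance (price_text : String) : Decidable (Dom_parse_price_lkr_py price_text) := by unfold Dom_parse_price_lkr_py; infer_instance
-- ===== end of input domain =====

-- B replaces A's "join the digit characters into a string, then int()" by a single
-- pass that folds each digit into a running integer accumulator (Horner's method);
-- same cost, no intermediate string (objective: alternative decomposition).

-- ===== PORT A =====
def parse_price_lkr_py (price_text : String) : Option Int :=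
  -- digits = "".join(ch for ch in (price_text or "") if ch.isdigit())   ('or ""' is the identity on str)
  let digits : String := String.ofList (price_text.toList.filter (fun ch => PySem.Chars.isdigit ch))
  -- if not digits: return None
  if digits = "" then none
  else
    -- try: return int(digits)  /  except ValueError: return None
    match PySem.Int.ofStr? digits with
    | some v => some v
    | none => none

-- ===== PORT B =====
def parse_price_lkr_py_alt (price_text : String) : Option Int :=
  -- value = 0; found = False; for ch in price_text: if ch.isdigit(): value = value*10 + (ord(ch)-48); found = True
  let r : Int × Bool := price_text.toList.foldl
    (fun st ch => if PySem.Chars.isdigit ch then (st.1 * 10 + ((ch.toNat : Int) - 48), true) else st)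
    ((0 : Int), false)
  -- return value if found else None
  if r.2 then some r.1 else none

-- ===== PRECONDITION & SPEC =====
def Spec_parse_price_lkr_py (price_text : String) (out : Option Int) : Prop := out = parse_price_lkr_py_alt price_text
instance (price_text : String) (out : Option Int) : Decidable (Spec_parse_price_lkr_py price_text out) := by unfold Spec_parse_price_lkr_py; infer_instance

-- ===== CLAIM (what is proved, stated in full; the proofs are below) =====
def Claim_equal_parse_price_lkr_py : Prop := ∀ (price_text : String), Dom_parse_price_lkr_py price_text → Spec_parse_price_lkr_py price_text (parse_price_lkr_py price_text)

-- ===== LEMMAS AND PROOFS =====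

-- Python's str.isdigit on one char coincides with Lean's Char.isDigit (both are '0' ≤ c ≤ '9').
theorem pv_isdigit_eq (c : Char) : PySem.Chars.isdigit c = c.isDigit := rfl

-- Horner accumulators: the Nat one mirrors the digit loop inside int(), the Int one mirrors B's loop.
def pvHornerN (a : Nat) (ds : List Char) : Nat :=
  ds.foldl (fun acc c => acc * 10 + (c.toNat - '0'.toNat)) a

def pvHornerZ (a : Int) (ds : List Char) : Int :=
  ds.foldl (fun acc c => acc * 10 + ((c.toNat : Int) - 48)) a

theorem pv_digit_ge (c : Char) (hd : c.isDigit = true) : 48 ≤ c.toNat := by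
  simp only [Char.isDigit, ge_iff_le, Bool.and_eq_true, decide_eq_true_eq] at hd
  have h := hd.1
  change '0'.val ≤ c.val at h
  rw [UInt32.le_iff_toNat_le] at h
  exact h

theorem pv_horner_cast (ds : List Char) : ∀ a : Nat, (∀ c ∈ ds, c.isDigit = true) →
    ((pvHornerN a ds : Nat) : Int) = pvHornerZ (a : Int) ds := by
  induction ds with
  | nil => intro a _; simp [pvHornerN, pvHornerZ]
  | cons c rest ih =>
    intro a h
    have hc : 48 ≤ c.toNat := pv_digit_ge c (h c (by simp))
    simp only [pvHornerN, pvHornerZ, List.foldl_cons] at *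
    rw [ih (a * 10 + (c.toNat - '0'.toNat)) (fun x hx => h x (List.mem_cons_of_mem _ hx))]
    congr 1
    have : '0'.toNat = 48 := rfl
    push_cast [this]
    omega

-- B's loop, characterised: the accumulator is the Horner value of the digits seen, the flag says whether any digit occurred.
theorem pv_foldB (l : List Char) : ∀ (v : Int) (b : Bool),
    l.foldl (fun st ch => if PySem.Chars.isdigit ch then (st.1 * 10 + ((ch.toNat : Int) - 48), true) else st) (v, b)
      = (pvHornerZ v (l.filter (fun ch => ch.isDigit)), b || !(l.filter (fun ch => ch.isDigit)).isEmpty) := by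
  induction l with
  | nil => intro v b; simp [pvHornerZ]
  | cons c rest ih =>
    intro v b
    simp only [List.foldl_cons, List.filter_cons, pv_isdigit_eq c]
    by_cases hc : c.isDigit = true
    · simp only [hc, if_pos]
      rw [ih]
      simp [pvHornerZ]
    · simp only [hc, Bool.false_eq_true, ite_false]
      rw [ih]

-- ---- characterisation of int(s) (PySem.Int.ofChars?) on a nonempty all-digit string ----

theorem pv_go_generic (g : List Char → Bool → Nat → Option Nat)
    (h0 : ∀ b a, g [] b a = if b then some a else none)
    (h1 : ∀ c rest b a, g (c :: rest) b a =
      if c.isDigit = true then g rest true (a * 10 + (c.toNat - '0'.toNat))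
      else if c = '_' ∧ b = true then
        (match rest with
         | d :: _ => if d.isDigit = true then g rest false a else none
         | [] => none)
      else none)
    (ds : List Char) (hds : ∀ c ∈ ds, c.isDigit = true) (hne : ds ≠ []) :
    ∀ b a, g ds b a = some (pvHornerN a ds) := by
  induction ds with
  | nil => exact absurd rfl hne
  | cons c rest ih =>
    intro b a
    rw [h1, if_pos (hds c (by simp))]
    rcases rest with _ | ⟨d, tail⟩
    · rw [h0]; simp [pvHornerN]
    · rw [ih (fun x hx => hds x (List.mem_cons_of_mem _ hx)) (by simp)]
      simp [pvHornerN]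

-- captures (by unification) the private digit loop inside PySem.Int.ofChars?
theorem pv_wrap_generic (dv : List Char → Option Nat) (g : List Char → Bool → Nat → Option Nat)
    (hdv : dv = fun cs => match cs with | [] => none | cs => g cs false 0)
    (h0 : ∀ b a, g [] b a = if b then some a else none)
    (h1 : ∀ c rest b a, g (c :: rest) b a =
      if c.isDigit = true then g rest true (a * 10 + (c.toNat - '0'.toNat))
      else if c = '_' ∧ b = true then
        (match rest with
         | d :: _ => if d.isDigit = true then g rest false a else none
         | [] => none)
      else none)
    (c : Char) (rest : List Char) (hds : ∀ x ∈ c :: rest, x.isDigit = true) :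
    Option.map (fun n : Int => n) ((dv (c :: rest)) >>= fun a => pure ((a : Nat) : Int))
      = some ((pvHornerN 0 (c :: rest) : Nat) : Int) := by
  rw [hdv]
  show Option.map (fun n : Int => n) ((g (c :: rest) false 0) >>= fun a => pure ((a : Nat) : Int)) = _
  rw [pv_go_generic g h0 h1 (c :: rest) hds (by simp) false 0]
  rfl

theorem pv_digit_not_space (c : Char) (hd : c.isDigit = true) : PySem.Int.isIntSpace c = false := by
  by_contra h
  simp only [Bool.not_eq_false, PySem.Int.isIntSpace, Bool.or_eq_true, decide_eq_true_eq] at h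
  rcases h with ((((rfl | rfl) | rfl) | rfl) | rfl) | rfl <;> simp [Char.isDigit] at hd

theorem pv_dw_self (l : List Char) (h : ∀ c ∈ l, c.isDigit = true) :
    List.dropWhile PySem.Int.isIntSpace l = l := by
  cases l with
  | nil => rfl
  | cons c rest => rw [List.dropWhile_cons_of_neg]; simp [pv_digit_not_space c (h c (by simp))]

theorem pv_ofChars?_all_digits (c : Char) (rest : List Char) (hds : ∀ x ∈ c :: rest, x.isDigit = true) :
    PySem.Int.ofChars? (c :: rest) = some ((pvHornerN 0 (c :: rest) : Nat) : Int) := by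
  unfold PySem.Int.ofChars?
  rw [pv_dw_self _ hds,
    pv_dw_self _ (by intro x hx; exact hds x (by rw [List.mem_reverse] at hx; exact hx)),
    List.reverse_reverse]
  dsimp only
  split
  · rename_i ds heq
    exfalso
    have h2 := hds c (by simp)
    rw [(List.cons_eq_cons.mp heq).1] at h2; simp [Char.isDigit] at h2
  · rename_i ds heq
    exfalso
    have h2 := hds c (by simp)
    rw [(List.cons_eq_cons.mp heq).1] at h2; simp [Char.isDigit] at h2
  · refine pv_wrap_generic _ ?g ?hdv ?h0 ?h1 c rest hds
    case hdv => rfl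
    case h0 => exact fun _ _ => rfl
    case h1 => exact fun _ _ _ _ => rfl

theorem pv_ofList_ne_empty (c : Char) (rest : List Char) : String.ofList (c :: rest) ≠ "" := by
  intro h
  have := congrArg String.toList h
  simp [String.toList_ofList] at this

-- ===== VERDICT (by name: the statement is the Claim_ definition above) =====
theorem parse_price_lkr_py_spec : Claim_equal_parse_price_lkr_py := by
  intro s _
  unfold Spec_parse_price_lkr_py parse_price_lkr_py parse_price_lkr_py_alt
  rw [pv_foldB s.toList 0 false]
  simp only [pv_isdigit_eq]
  rcases hf : s.toList.filter (fun ch => ch.isDigit) with _ | ⟨c, rest⟩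
  · rw [hf]
    simp
  · rw [hf]
    have hds : ∀ x ∈ c :: rest, x.isDigit = true := by
      intro x hx
      rw [← hf] at hx
      exact (List.mem_filter.mp hx).2
    rw [if_neg (pv_ofList_ne_empty c rest), PySem.Int.ofStr?_ofList, pv_ofChars?_all_digits c rest hds]
    simp only [Bool.false_or, List.isEmpty_cons, Bool.not_false, if_pos]
    rw [pv_horner_cast (c :: rest) 0 hds]
    rfl
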